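-- pv_equiv track=rewrite | github.com/marisa901225-cmyk/personal-portfolio | backend/services/news/weather_kma.py | _select_earliest_values
-- ===== SOURCE A (Python) =====
-- from typing import Any, Dict, List, Optional, Sequence
--
-- def _select_earliest_values(items: List[Dict[str, Any]]) -> Dict[str, Dict[str, str]]:
--     """카테고리별로 가장 가까운 예측시각 값을 선택한다."""
--     selected: Dict[str, Dict[str, str]] = {}
--     for item in items:
--         category = str(item.get("category", ""))
--         if not category:
--             continue
--
--         fcst_date = str(item.get("fcstDate", ""))
--         fcst_time = str(item.get("fcstTime", ""))
--         fcst_value = str(item.get("fcstValue", ""))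
--         sort_key = f"{fcst_date}{fcst_time}"
--
--         prev = selected.get(category)
--         if prev is None or sort_key < prev["sort_key"]:
--             selected[category] = {
--                 "value": fcst_value,
--                 "date": fcst_date,
--                 "time": fcst_time,
--                 "sort_key": sort_key,
--             }
--     return selected
-- ===== SOURCE B (Python) =====
-- from typing import Any, Dict, List
--
-- def _select_earliest_values(items: List[Dict[str, Any]]) -> Dict[str, Dict[str, str]]:
--     # Pass 1: categories in order of first appearance (empty ones skipped).
--     order: List[str] = []
--     for item in items:
--         category = str(item.get("category", ""))
--         if category and category not in order:
--             order.append(category)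
--     # Pass 2: per category, pick the item with the smallest fcstDate+fcstTime
--     # (min returns the first minimum, matching strict-< replacement).
--     result: Dict[str, Dict[str, str]] = {}
--     for category in order:
--         group = [it for it in items if str(it.get("category", "")) == category]
--         best = min(group,
--                    key=lambda it: str(it.get("fcstDate", "")) + str(it.get("fcstTime", "")),
--                    default={})
--         fcst_date = str(best.get("fcstDate", ""))
--         fcst_time = str(best.get("fcstTime", ""))
--         result[category] = {
--             "value": str(best.get("fcstValue", "")),
--             "date": fcst_date,
--             "time": fcst_time,
--             "sort_key": f"{fcst_date}{fcst_time}",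
--         }
--     return result
-- ===== Notes on version B (the rewrite author's own statement) =====
-- stated objective: alternative
-- what changed: A keeps a running best-so-far record per category in one dict-updating pass; B first collects the categories in order of first appearance, then for each category filters its group and picks the earliest item with min(), building each output record once.
import Mathlib
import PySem

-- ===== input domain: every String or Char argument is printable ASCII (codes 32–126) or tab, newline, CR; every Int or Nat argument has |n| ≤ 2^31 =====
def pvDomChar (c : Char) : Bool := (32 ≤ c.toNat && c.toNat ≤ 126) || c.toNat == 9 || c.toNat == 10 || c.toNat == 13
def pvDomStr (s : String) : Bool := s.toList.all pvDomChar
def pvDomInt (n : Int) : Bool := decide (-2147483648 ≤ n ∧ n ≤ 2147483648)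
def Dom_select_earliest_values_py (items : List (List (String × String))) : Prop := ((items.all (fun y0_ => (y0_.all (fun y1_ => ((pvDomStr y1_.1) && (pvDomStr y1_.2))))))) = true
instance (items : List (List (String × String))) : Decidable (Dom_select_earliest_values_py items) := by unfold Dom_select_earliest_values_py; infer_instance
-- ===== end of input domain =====

-- B replaces A's single running-best dict pass by a group-then-min two-pass decomposition (alternative, not faster).
-- ===== PORT A =====
-- item.get(k, "") on a dict item (association list, first match)
def pvGetStr (it : List (String × String)) (k : String) : String :=
  (PySem.Dict.mk it).getD k ""

def select_earliest_values_py (items : List (List (String × String))) : List (String × List (String × String)) :=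
  (items.foldl (fun (selected : PySem.Dict String (List (String × String))) item =>
      let category := pvGetStr item "category"
      if category = "" then selected
      else
        let fcst_date := pvGetStr item "fcstDate"
        let fcst_time := pvGetStr item "fcstTime"
        let fcst_value := pvGetStr item "fcstValue"
        let sort_key := fcst_date ++ fcst_time
        match selected.get? category with
        | none =>
            selected.insert category
              [("value", fcst_value), ("date", fcst_date), ("time", fcst_time), ("sort_key", sort_key)]
        | some prev =>
            if sort_key < (PySem.Dict.mk prev).getD "sort_key" "" then
              selected.insert category
                [("value", fcst_value), ("date", fcst_date), ("time", fcst_time), ("sort_key", sort_key)]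
            else selected)
    PySem.Dict.empty).items

-- ===== PORT B =====
def select_earliest_values_py_alt (items : List (List (String × String))) : List (String × List (String × String)) :=
  let order := items.foldl (fun (acc : List String) item =>
      let category := pvGetStr item "category"
      if category ≠ "" ∧ category ∉ acc then acc ++ [category] else acc) []
  (order.foldl (fun (result : PySem.Dict String (List (String × String))) category =>
      let group := items.filter (fun it => pvGetStr it "category" == category)
      let best := PySem.List.minD group (fun it => pvGetStr it "fcstDate" ++ pvGetStr it "fcstTime") []
      let fcst_date := pvGetStr best "fcstDate"
      let fcst_time := pvGetStr best "fcstTime"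
      result.insert category
        [("value", pvGetStr best "fcstValue"), ("date", fcst_date), ("time", fcst_time),
         ("sort_key", fcst_date ++ fcst_time)])
    PySem.Dict.empty).items

-- ===== PRECONDITION & SPEC =====
def Spec_select_earliest_values_py (items : List (List (String × String))) (out : List (String × List (String × String))) : Prop := out = select_earliest_values_py_alt items
instance (items : List (List (String × String))) (out : List (String × List (String × String))) : Decidable (Spec_select_earliest_values_py items out) := by unfold Spec_select_earliest_values_py; infer_instance

-- ===== CLAIM (what is proved, stated in full; the proofs are below) =====
def Claim_equal_select_earliest_values_py : Prop := ∀ (items : List (List (String × String))), Dom_select_earliest_values_py items → Spec_select_earliest_values_py items (select_earliest_values_py items)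

-- ===== LEMMAS AND PROOFS =====

-- A's loop body, named (definitionally the lambda inside select_earliest_values_py)
def pvStepA (selected : PySem.Dict String (List (String × String))) (item : List (String × String)) :
    PySem.Dict String (List (String × String)) :=
  let category := pvGetStr item "category"
  if category = "" then selected
  else
    let fcst_date := pvGetStr item "fcstDate"
    let fcst_time := pvGetStr item "fcstTime"
    let fcst_value := pvGetStr item "fcstValue"
    let sort_key := fcst_date ++ fcst_time
    match selected.get? category with
    | none =>
        selected.insert category
          [("value", fcst_value), ("date", fcst_date), ("time", fcst_time), ("sort_key", sort_key)]
    | some prev =>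
        if sort_key < (PySem.Dict.mk prev).getD "sort_key" "" then
          selected.insert category
            [("value", fcst_value), ("date", fcst_date), ("time", fcst_time), ("sort_key", sort_key)]
        else selected

-- B's first loop body, named
def pvOrdStep (acc : List String) (item : List (String × String)) : List String :=
  let category := pvGetStr item "category"
  if category ≠ "" ∧ category ∉ acc then acc ++ [category] else acc

def pvOrd (items : List (List (String × String))) : List String :=
  items.foldl pvOrdStep []

def pvKeyOf (it : List (String × String)) : String :=
  pvGetStr it "fcstDate" ++ pvGetStr it "fcstTime"

def pvRec (it : List (String × String)) : List (String × String) :=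
  [("value", pvGetStr it "fcstValue"), ("date", pvGetStr it "fcstDate"),
   ("time", pvGetStr it "fcstTime"), ("sort_key", pvKeyOf it)]

def pvBest (items : List (List (String × String))) (c : String) : List (String × String) :=
  PySem.List.minD (items.filter (fun it => pvGetStr it "category" == c)) pvKeyOf []

def pvRHS (items : List (List (String × String))) : List (String × List (String × String)) :=
  (pvOrd items).map (fun c => (c, pvRec (pvBest items c)))

theorem pvRec_sort_key (it : List (String × String)) :
    (PySem.Dict.mk (pvRec it)).getD "sort_key" "" = pvKeyOf it := by
  simp [pvRec, PySem.Dict.getD, PySem.Dict.get?]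

theorem pvOrd_mem (items : List (List (String × String))) (acc : List String) (c : String) :
    c ∈ items.foldl pvOrdStep acc ↔
      c ∈ acc ∨ (c ≠ "" ∧ ∃ it ∈ items, pvGetStr it "category" = c) := by
  induction items generalizing acc with
  | nil => simp
  | cons x t ih =>
    simp only [List.foldl_cons, ih, pvOrdStep]
    split_ifs with h
    · simp only [List.mem_append, List.mem_cons]
      aesop
    · rw [not_and_or, not_not] at h
      simp only [List.mem_cons]
      aesop

theorem pvOrd_nodup (items : List (List (String × String))) (acc : List String) (h : acc.Nodup) :
    (items.foldl pvOrdStep acc).Nodup := by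
  induction items generalizing acc with
  | nil => simpa
  | cons x t ih =>
    simp only [List.foldl_cons, pvOrdStep]
    split_ifs with hx
    · refine ih _ ?_
      simp only [List.nodup_append, h, List.nodup_singleton, true_and]
      aesop
    · exact ih _ h

theorem pvMin?_append (g : List (List (String × String))) (x : List (String × String)) :
    PySem.List.min? (g ++ [x]) pvKeyOf =
      match PySem.List.min? g pvKeyOf with
      | none => some x
      | some m => if pvKeyOf x < pvKeyOf m then some x else some m := by
  unfold PySem.List.min?
  rw [List.foldl_append]
  simp only [List.foldl_cons, List.foldl_nil]
  split <;> simp_all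

-- pvStepA with the record and key abbreviated (definitional)
theorem pvStepA_eq (d : PySem.Dict String (List (String × String))) (x : List (String × String)) :
    pvStepA d x =
      if pvGetStr x "category" = "" then d
      else
        match d.get? (pvGetStr x "category") with
        | none => d.insert (pvGetStr x "category") (pvRec x)
        | some prev =>
            if pvKeyOf x < (PySem.Dict.mk prev).getD "sort_key" "" then
              d.insert (pvGetStr x "category") (pvRec x)
            else d := rfl

-- main invariant: A's dict after the whole pass is exactly B's per-category table
theorem pvMain (items : List (List (String × String))) :
    (items.foldl pvStepA PySem.Dict.empty).items = pvRHS items := by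
  induction items using List.reverseRecOn with
  | nil => rfl
  | append_singleton t x ih =>
    rw [List.foldl_append, List.foldl_cons, List.foldl_nil]
    set d := t.foldl pvStepA PySem.Dict.empty with hd
    have hkeys : d.keys = pvOrd t := by
      simp [PySem.Dict.keys, ih, pvRHS, List.map_map, Function.comp_def]
    have hnodup : d.keys.Nodup := by rw [hkeys]; exact pvOrd_nodup t [] List.nodup_nil
    have hordapp : pvOrd (t ++ [x]) = pvOrdStep (pvOrd t) x := by
      unfold pvOrd; rw [List.foldl_append, List.foldl_cons, List.foldl_nil]
    have hfil : ∀ c', (t ++ [x]).filter (fun it => pvGetStr it "category" == c') =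
        t.filter (fun it => pvGetStr it "category" == c') ++
          (if pvGetStr x "category" == c' then [x] else []) := by
      intro c'; rw [List.filter_append]; simp [List.filter_singleton]
    have hbest_ne : ∀ c', pvGetStr x "category" ≠ c' → pvBest (t ++ [x]) c' = pvBest t c' := by
      intro c' hne
      unfold pvBest
      rw [hfil]
      simp [hne]
    have hmem_ne_nil : ∀ c' ∈ pvOrd t, t.filter (fun it => pvGetStr it "category" == c') ≠ [] := by
      intro c' hm
      rcases (pvOrd_mem t [] c').mp hm with h | ⟨hne, it, hit, hcat⟩
      · simp at h
      · exact List.ne_nil_of_mem (List.mem_filter.mpr ⟨hit, by simp [hcat]⟩)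
    have hbest_some : ∀ c' ∈ pvOrd t,
        PySem.List.min? (t.filter (fun it => pvGetStr it "category" == c')) pvKeyOf
          = some (pvBest t c') := by
      intro c' hm
      cases hmin : PySem.List.min? (t.filter (fun it => pvGetStr it "category" == c')) pvKeyOf with
      | none => exact absurd ((PySem.List.min?_eq_none_iff _ _).mp hmin) (hmem_ne_nil c' hm)
      | some m => simp [pvBest, PySem.List.minD, hmin]
    by_cases hc : pvGetStr x "category" = ""
    · rw [pvStepA_eq, if_pos hc, ih]
      unfold pvRHS
      rw [hordapp]
      have hstep : pvOrdStep (pvOrd t) x = pvOrd t := by simp [pvOrdStep, hc]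
      rw [hstep]
      apply List.map_congr_left
      intro c' hc'
      rcases (pvOrd_mem t [] c').mp hc' with h | ⟨hne, _⟩
      · simp at h
      · rw [hbest_ne c' (fun he => hne (by rw [← he]; exact hc))]
    · by_cases hmem : pvGetStr x "category" ∈ pvOrd t
      · -- existing category: A updates in place iff strictly earlier
        have hitems : (pvGetStr x "category", pvRec (pvBest t (pvGetStr x "category"))) ∈ d.items := by
          rw [ih]
          exact List.mem_map_of_mem hmem
        have hget : d.get? (pvGetStr x "category")
            = some (pvRec (pvBest t (pvGetStr x "category"))) :=
          PySem.Dict.get?_of_mem_items d hitems hnodup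
        have hstep : pvOrdStep (pvOrd t) x = pvOrd t := by simp [pvOrdStep, hmem]
        have hbest_eq : pvBest (t ++ [x]) (pvGetStr x "category") =
            (if pvKeyOf x < pvKeyOf (pvBest t (pvGetStr x "category"))
              then x else pvBest t (pvGetStr x "category")) := by
          unfold pvBest PySem.List.minD
          rw [hfil]
          simp only [beq_self_eq_true, if_true]
          rw [pvMin?_append, hbest_some _ hmem]
          by_cases h : pvKeyOf x < pvKeyOf (pvBest t (pvGetStr x "category")) <;> simp [h]
        rw [pvStepA_eq, if_neg hc, hget]
        simp only [pvRec_sort_key]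
        by_cases hlt : pvKeyOf x < pvKeyOf (pvBest t (pvGetStr x "category"))
        · rw [if_pos hlt]
          have hcont : d.contains (pvGetStr x "category") = true := by
            rw [PySem.Dict.contains_eq_isSome_get?, hget]; rfl
          rw [PySem.Dict.items_insert_of_contains d _ hcont, ih]
          unfold pvRHS
          rw [hordapp, hstep, List.map_map]
          apply List.map_congr_left
          intro c' hc'
          by_cases hcc : pvGetStr x "category" = c'
          · subst hcc
            simp only [Function.comp, BEq.rfl, if_pos]
            rw [hbest_eq, if_pos hlt]
          · have hbf : (c' == pvGetStr x "category") = false :=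
              beq_eq_false_iff_ne.mpr (Ne.symm hcc)
            simp [Function.comp, hbf, hbest_ne c' hcc]
        · rw [if_neg hlt, ih]
          unfold pvRHS
          rw [hordapp, hstep]
          apply List.map_congr_left
          intro c' hc'
          by_cases hcc : pvGetStr x "category" = c'
          · subst hcc
            rw [hbest_eq, if_neg hlt]
          · rw [hbest_ne c' hcc]
      · -- fresh category: A appends, B's order gains it at the end
        have hget : d.get? (pvGetStr x "category") = none := by
          rw [PySem.Dict.get?_eq_none_iff_not_mem_keys, hkeys]
          exact hmem
        have hcont : d.contains (pvGetStr x "category") = false := by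
          rw [PySem.Dict.contains_eq_isSome_get?, hget]; rfl
        have hstep : pvOrdStep (pvOrd t) x = pvOrd t ++ [pvGetStr x "category"] := by
          simp [pvOrdStep, hc, hmem]
        have hfil_empty : t.filter (fun it => pvGetStr it "category" == pvGetStr x "category") = [] := by
          rw [List.filter_eq_nil_iff]
          intro it hit hbeq
          exact hmem ((pvOrd_mem t [] _).mpr
            (Or.inr ⟨hc, it, hit, by simpa using hbeq⟩))
        have hbest_new : pvBest (t ++ [x]) (pvGetStr x "category") = x := by
          unfold pvBest
          rw [hfil, hfil_empty]
          simp [PySem.List.minD, PySem.List.min?]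
        rw [pvStepA_eq, if_neg hc, hget]
        rw [PySem.Dict.items_insert_of_not_contains d _ hcont, ih]
        unfold pvRHS
        rw [hordapp, hstep, List.map_append]
        congr 1
        · apply List.map_congr_left
          intro c' hc'
          rw [hbest_ne c' (fun he => hmem (he ▸ hc'))]
        · simp [hbest_new]

theorem pvA_eq (items : List (List (String × String))) :
    select_earliest_values_py items = (items.foldl pvStepA PySem.Dict.empty).items := rfl

theorem pvB_eq (items : List (List (String × String))) :
    select_earliest_values_py_alt items = pvRHS items := by
  have h := PySem.Dict.items_foldl_insert_fresh (pvOrd items) (fun c => c)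
      (fun c => pvRec (pvBest items c)) PySem.Dict.empty
      (fun a _ => by simp) (by simpa using pvOrd_nodup items [] List.nodup_nil)
  exact h

-- ===== VERDICT (by name: the statement is the Claim_ definition above) =====
theorem select_earliest_values_py_spec : Claim_equal_select_earliest_values_py := by
  intro items _
  show select_earliest_values_py items = select_earliest_values_py_alt items
  rw [pvA_eq, pvMain, pvB_eq]
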